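-- pv_equiv track=rewrite | github.com/mluckau/autodarts-caller-xt | autodarts-caller.py | grab_caller_language
-- ===== SOURCE A (Python) =====
-- CALLER_LANGUAGES = {
--     1: [
--         "english",
--         "en",
--     ],
--     2: [
--         "french",
--         "fr",
--     ],
--     3: [
--         "russian",
--         "ru",
--     ],
--     4: [
--         "german",
--         "de",
--     ],
--     5: [
--         "spanish",
--         "es",
--     ],
--     6: [
--         "dutch",
--         "nl",
--     ],
-- }
--
-- def grab_caller_language(caller_name):
--     first_occurrences = []
--     caller_name = "-" + caller_name + "-"
--     for key in CALLER_LANGUAGES: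
--         for tag in CALLER_LANGUAGES[key]:
--             tag_with_dashes = "-" + tag + "-"
--             index = caller_name.find(tag_with_dashes)
--             if index != -1:  # find returns -1 if the tag is not found
--                 first_occurrences.append((index, key))
--
--     if not first_occurrences:  # if the list is empty
--         return None
--
--     # Sort the list of first occurrences and get the language of the tag that appears first
--     first_occurrences.sort(key=lambda x: x[0])
--     return first_occurrences[0][1]
-- ===== SOURCE B (Python) =====
-- CALLER_LANGUAGES = {
--     1: [
--         "english",
--         "en",
--     ],
--     2: [
--         "french",
--         "fr",
--     ],
--     3: [
--         "russian",
--         "ru",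
--     ],
--     4: [
--         "german",
--         "de",
--     ],
--     5: [
--         "spanish",
--         "es",
--     ],
--     6: [
--         "dutch",
--         "nl",
--     ],
-- }
--
--
-- def grab_caller_language(caller_name):
--     # Position-major scan: walk the wrapped name left to right and return the
--     # key of the first dash-delimited tag that starts there; nothing matched -> None.
--     name = "-" + caller_name + "-"
--     for i in range(len(name)):
--         rest = name[i:]
--         for key, tags in CALLER_LANGUAGES.items():
--             for tag in tags:
--                 if rest.startswith("-" + tag + "-"):
--                     return key
--     return None
-- ===== Notes on version B (the rewrite author's own statement) =====
-- stated objective: alternative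
-- what changed: Replaces collect-all-(index,key)-matches-then-stable-sort-and-take-head with a position-major scan: walk the wrapped name left to right and return the key of the first dash-delimited tag that starts at the current position (early exit, no match list, no sort); correct because the earliest find-index over all tags is exactly the first position where some tag matches, and ties at one position resolve in table order on both sides.
import Mathlib
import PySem

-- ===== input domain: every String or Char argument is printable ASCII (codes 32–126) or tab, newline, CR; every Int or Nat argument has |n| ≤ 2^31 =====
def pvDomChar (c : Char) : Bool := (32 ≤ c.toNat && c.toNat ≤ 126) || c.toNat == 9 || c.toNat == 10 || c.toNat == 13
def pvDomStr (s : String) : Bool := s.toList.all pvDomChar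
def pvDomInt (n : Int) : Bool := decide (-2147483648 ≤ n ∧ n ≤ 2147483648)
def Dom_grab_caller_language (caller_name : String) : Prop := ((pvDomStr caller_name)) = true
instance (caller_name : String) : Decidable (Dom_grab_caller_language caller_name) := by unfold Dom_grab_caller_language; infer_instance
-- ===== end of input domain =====

-- B replaces "collect every (index, key) match, stable-sort by index, take the head" by a
-- position-major scan of the dash-wrapped name: walk the positions left to right and return the
-- key of the first dash-delimited tag that starts there (objective: alternative — no match list, no sort).

-- the module constant CALLER_LANGUAGES (dict in insertion order)
def pvCallerLanguages : List (Int × List String) :=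
  [(1, ["english", "en"]), (2, ["french", "fr"]), (3, ["russian", "ru"]),
   (4, ["german", "de"]), (5, ["spanish", "es"]), (6, ["dutch", "nl"])]

-- ===== PORT A =====
def grab_caller_language (caller_name : String) : Option Int :=
  let cn := "-" ++ caller_name ++ "-"
  let first_occurrences : List (Int × Int) :=
    pvCallerLanguages.foldl (fun acc kt =>
      kt.2.foldl (fun acc tag =>
        let index := PySem.Str.find cn ("-" ++ tag ++ "-")
        if index ≠ -1 then acc ++ [(index, kt.1)] else acc) acc) []
  match PySem.List.sorted first_occurrences (fun x => x.1) false with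
  | [] => none
  | x :: _ => some x.2

-- ===== PORT B =====
-- Python B: for i in range(len(name)): rest = name[i:]; for key, tags in …: for tag in tags:
--             if rest.startswith("-"+tag+"-"): return key    (early return ported as findSome?)
def grab_caller_language_alt (caller_name : String) : Option Int :=
  let name := "-" ++ caller_name ++ "-"
  (PySem.List.pyRange 0 (PySem.Str.len name) 1).findSome? (fun i =>
    pvCallerLanguages.findSome? (fun kt =>
      kt.2.findSome? (fun tag =>
        if PySem.Str.startswith (PySem.Str.slice name (some i) none) ("-" ++ tag ++ "-")
        then some kt.1 else none)))

-- ===== PRECONDITION & SPEC =====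
def Spec_grab_caller_language (caller_name : String) (out : Option Int) : Prop := out = grab_caller_language_alt caller_name
instance (caller_name : String) (out : Option Int) : Decidable (Spec_grab_caller_language caller_name out) := by unfold Spec_grab_caller_language; infer_instance

-- ===== CLAIM (what is proved, stated in full; the proofs are below) =====
def Claim_equal_grab_caller_language : Prop := ∀ (caller_name : String), Dom_grab_caller_language caller_name → Spec_grab_caller_language caller_name (grab_caller_language caller_name)

-- ===== LEMMAS AND PROOFS =====

-- running-minimum step on (index, key) pairs: keep the earlier-index pair, the first one on ties
def pvStep (b : Option (Int × Int)) (x : Int × Int) : Option (Int × Int) :=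
  match b with
  | none => some x
  | some m => if x.1 < m.1 then some x else some m

-- the list of (index, key) matches A collects, abstracted over the index function
def pvOccs (idx : String → Int) : List (Int × Int) :=
  pvCallerLanguages.flatMap (fun kt =>
    (kt.2.filter (fun t => decide (idx t ≠ -1))).map (fun t => (idx t, kt.1)))

-- ---- A-side: head of the stable sort = running minimum over the match list ----

lemma pvHead_insertBy (x : Int × Int) (acc : List (Int × Int)) :
    (PySem.List.insertBy (fun a b => decide (a.1 < b.1)) x acc).head? = pvStep acc.head? x := by
  cases acc with
  | nil => simp [PySem.List.insertBy, pvStep]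
  | cons y ys =>
      simp only [PySem.List.insertBy, pvStep, List.head?_cons]
      split_ifs with h <;> simp_all

lemma pvHead_foldl_insertBy (l : List (Int × Int)) : ∀ acc : List (Int × Int),
    (l.foldl (fun acc x => PySem.List.insertBy (fun a b => decide (a.1 < b.1)) x acc) acc).head?
      = l.foldl pvStep acc.head? := by
  induction l with
  | nil => intro acc; rfl
  | cons x t ih =>
      intro acc
      simp only [List.foldl_cons, ih, pvHead_insertBy]

lemma pvSortedHead (l : List (Int × Int)) :
    (PySem.List.sorted l (fun x => x.1) false).head? = l.foldl pvStep none := by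
  rw [PySem.List.sorted_eq_foldl_insertBy]
  simpa using pvHead_foldl_insertBy l []

lemma pvA_match (l : List (Int × Int)) :
    (match PySem.List.sorted l (fun x => x.1) false with
     | [] => none
     | x :: _ => some x.2) = (l.foldl pvStep none).map (·.2) := by
  rw [← pvSortedHead]
  cases PySem.List.sorted l (fun x => x.1) false <;> simp

lemma pvA_occ (idx : String → Int) (table : List (Int × List String)) :
    ∀ acc : List (Int × Int),
    table.foldl (fun acc kt =>
        kt.2.foldl (fun acc tag =>
          if idx tag ≠ -1 then acc ++ [(idx tag, kt.1)] else acc) acc) acc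
      = acc ++ table.flatMap (fun kt =>
          (kt.2.filter (fun t => decide (idx t ≠ -1))).map (fun t => (idx t, kt.1))) := by
  induction table with
  | nil => intro acc; simp
  | cons kt rest ih =>
      intro acc
      simp only [List.foldl_cons, List.flatMap_cons]
      rw [PySem.List.foldl_append_ite (p := fun t => idx t ≠ -1) (f := fun t => (idx t, kt.1)), ih,
        List.append_assoc]

lemma pvA_eq (caller_name : String) :
    grab_caller_language caller_name
      = ((pvOccs (fun t => PySem.Str.find ("-" ++ caller_name ++ "-") ("-" ++ t ++ "-"))).foldl pvStep none).map (·.2) := by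
  rw [show grab_caller_language caller_name
      = (match PySem.List.sorted
          (pvCallerLanguages.foldl (fun acc kt =>
            kt.2.foldl (fun acc tag =>
              if PySem.Str.find ("-" ++ caller_name ++ "-") ("-" ++ tag ++ "-") ≠ -1 then
                acc ++ [(PySem.Str.find ("-" ++ caller_name ++ "-") ("-" ++ tag ++ "-"), kt.1)]
              else acc) acc) []) (fun x => x.1) false with
         | [] => none
         | x :: _ => some x.2) from rfl]
  rw [pvA_occ (fun t => PySem.Str.find ("-" ++ caller_name ++ "-") ("-" ++ t ++ "-")) pvCallerLanguages []]
  rw [pvA_match]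
  rfl

-- ---- the running minimum: never none on a nonempty list, and its first-minimum decomposition ----

lemma pvFoldl_isSome (l : List (Int × Int)) : ∀ a : Int × Int, (l.foldl pvStep (some a)).isSome := by
  induction l with
  | nil => intro a; rfl
  | cons x t ih =>
      intro a
      rw [List.foldl_cons, show pvStep (some a) x = if x.1 < a.1 then some x else some a from rfl]
      split_ifs <;> exact ih _

lemma pvFoldl_none_eq_nil (l : List (Int × Int)) (h : l.foldl pvStep none = none) : l = [] := by
  cases l with
  | nil => rfl
  | cons x t =>
      rw [List.foldl_cons, show pvStep none x = some x from rfl] at h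
      have := pvFoldl_isSome t x
      rw [h] at this
      simp at this

lemma pvFoldl_some_decomp (l : List (Int × Int)) : ∀ (a m : Int × Int),
    l.foldl pvStep (some a) = some m →
    (m = a ∧ ∀ x ∈ l, a.1 ≤ x.1) ∨
    (∃ l1 l2, l = l1 ++ m :: l2 ∧ m.1 < a.1 ∧ (∀ x ∈ l1, m.1 < x.1) ∧ (∀ x ∈ l2, m.1 ≤ x.1)) := by
  induction l with
  | nil =>
      intro a m h
      left
      refine ⟨by injection h with h; exact h.symm, by simp⟩
  | cons x t ih =>
      intro a m h
      rw [List.foldl_cons, show pvStep (some a) x = if x.1 < a.1 then some x else some a from rfl] at h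
      by_cases hlt : x.1 < a.1
      · rw [if_pos hlt] at h
        rcases ih x m h with ⟨hm, hall⟩ | ⟨l1, l2, heq, hma, h1, h2⟩
        · subst hm
          exact Or.inr ⟨[], t, by simp, hlt, by simp, hall⟩
        · refine Or.inr ⟨x :: l1, l2, by simp [heq], lt_trans hma hlt, ?_, h2⟩
          intro y hy
          rcases List.mem_cons.mp hy with hy | hy
          · rw [hy]; exact hma
          · exact h1 y hy
      · rw [if_neg hlt] at h
        rw [not_lt] at hlt
        rcases ih a m h with ⟨hm, hall⟩ | ⟨l1, l2, heq, hma, h1, h2⟩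
        · refine Or.inl ⟨hm, ?_⟩
          intro y hy
          rcases List.mem_cons.mp hy with hy | hy
          · rw [hy]; exact hlt
          · exact hall y hy
        · refine Or.inr ⟨x :: l1, l2, by simp [heq], hma, ?_, h2⟩
          intro y hy
          rcases List.mem_cons.mp hy with hy | hy
          · rw [hy]; exact lt_of_lt_of_le hma hlt
          · exact h1 y hy

lemma pvMin_decomp (l : List (Int × Int)) (m : Int × Int) (h : l.foldl pvStep none = some m) :
    ∃ l1 l2, l = l1 ++ m :: l2 ∧ (∀ x ∈ l1, m.1 < x.1) ∧ (∀ x ∈ l, m.1 ≤ x.1) := by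
  cases l with
  | nil => simp [List.foldl] at h
  | cons z t =>
      rw [List.foldl_cons, show pvStep none z = some z from rfl] at h
      rcases pvFoldl_some_decomp t z m h with ⟨hm, hall⟩ | ⟨l1, l2, heq, hma, h1, h2⟩
      · subst hm
        refine ⟨[], t, by simp, by simp, ?_⟩
        intro y hy
        rcases List.mem_cons.mp hy with hy | hy
        · rw [hy]
        · exact hall y hy
      · refine ⟨z :: l1, l2, by simp [heq], ?_, ?_⟩
        · intro y hy
          rcases List.mem_cons.mp hy with hy | hy
          · rw [hy]; exact hma
          · exact h1 y hy
        · intro y hy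
          rcases List.mem_cons.mp hy with hy | hy
          · rw [hy]; exact le_of_lt hma
          · rw [heq] at hy
            rcases List.mem_append.mp hy with hy | hy
            · exact le_of_lt (h1 y hy)
            · rcases List.mem_cons.mp hy with hy | hy
              · rw [hy]
              · exact h2 y hy

-- ---- membership in the match list ----

lemma pvMem_occs_intro (idx : String → Int) {kt : Int × List String} {t : String}
    (hkt : kt ∈ pvCallerLanguages) (ht : t ∈ kt.2) (h : idx t ≠ -1) :
    (idx t, kt.1) ∈ pvOccs idx := by
  simp only [pvOccs, List.mem_flatMap]
  refine ⟨kt, hkt, ?_⟩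
  simp only [List.mem_map, List.mem_filter, decide_eq_true_eq]
  exact ⟨t, ⟨ht, h⟩, rfl⟩

lemma pvMem_occs_elim (idx : String → Int) {x : Int × Int} (h : x ∈ pvOccs idx) :
    ∃ kt, kt ∈ pvCallerLanguages ∧ ∃ t, t ∈ kt.2 ∧ idx t ≠ -1 ∧ x = (idx t, kt.1) := by
  simp only [pvOccs, List.mem_flatMap, List.mem_map, List.mem_filter, decide_eq_true_eq] at h
  obtain ⟨kt, hkt, t, ⟨ht, hne⟩, hx⟩ := h
  exact ⟨kt, hkt, t, ht, hne, hx.symm⟩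

-- ---- find vs a match at a given position ----

lemma pvIdx_nonneg {L sub : List Char} {j : Nat} (h : sub <+: L.drop j) :
    0 ≤ PySem.Chars.find L sub := by
  exact (PySem.Chars.find_nonneg_iff L sub).mpr (h.isInfix.trans (List.drop_suffix j L).isInfix)

lemma pvIdx_le {L sub : List Char} {j : Nat} (h : sub <+: L.drop j) :
    PySem.Chars.find L sub ≤ (j : Int) := by
  have h0 := pvIdx_nonneg h
  by_contra hlt
  exact (PySem.Chars.find_spec h0).2 j (by omega) h

-- the port's position test, read as a prefix of the dropped list
lemma pvCond_iff (s t : String) (i : Nat) :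
    PySem.Str.startswith (PySem.Str.slice s (some (i : Int)) none) t = true
      ↔ t.toList <+: s.toList.drop i := by
  simp only [pysem, PySem.List.slice_from_natCast]

-- ---- findSome? over range: the first hit wins ----

lemma pvFindSome_range {α : Type} (f : Nat → Option α) (n j : Nat) (v : α) (hj : j < n)
    (h1 : ∀ i < j, f i = none) (h2 : f j = some v) :
    (List.range n).findSome? f = some v := by
  have hn : n = (j + 1) + (n - (j + 1)) := by omega
  rw [hn, List.range_add, List.findSome?_append, List.range_succ, List.findSome?_append]
  have hnone : (List.range j).findSome? f = none :=
    List.findSome?_eq_none_iff.mpr (fun x hx => h1 x (List.mem_range.mp hx))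
  simp [hnone, h2]

-- ---- B's inner table scan at one position = first match-list entry with that index ----

lemma pvInner_tags (cond : String → Bool) (idxf : String → Int) (j : Int) (hj : j ≠ -1) (k : Int) :
    ∀ tags : List String, (∀ t ∈ tags, cond t = true ↔ idxf t = j) →
    tags.findSome? (fun tag => if cond tag then some k else none)
      = (((tags.filter (fun t => decide (idxf t ≠ -1))).map (fun t => (idxf t, k))).find?
          (fun x => decide (x.1 = j))).map (·.2) := by
  intro tags
  induction tags with
  | nil => intro _; rfl
  | cons t ts ih =>
      intro H
      have Ht := H t (List.mem_cons_self ..)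
      by_cases hc : cond t = true
      · have hidx : idxf t = j := Ht.mp hc
        rw [List.findSome?_cons]
        rw [List.filter_cons_of_pos (by simp [hidx, hj]), List.map_cons,
          List.find?_cons_of_pos (by simp [hidx])]
        simp [hc]
      · have hne : idxf t ≠ j := fun he => hc (Ht.mpr he)
        have hLHS : (t :: ts).findSome? (fun tag => if cond tag then some k else none)
            = ts.findSome? (fun tag => if cond tag then some k else none) := by
          rw [List.findSome?_cons]
          simp [hc]
        rw [hLHS, ih (fun t' ht' => H t' (List.mem_cons_of_mem _ ht'))]
        by_cases hf : idxf t ≠ -1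
        · rw [List.filter_cons_of_pos (by simp [hf]), List.map_cons,
            List.find?_cons_of_neg (by simp [hne])]
        · rw [List.filter_cons_of_neg (by simp at hf ⊢; exact hf)]

lemma pvInner_eq (cond : String → Bool) (idxf : String → Int) (j : Int) (hj : j ≠ -1) :
    ∀ table : List (Int × List String),
      (∀ kt ∈ table, ∀ t ∈ kt.2, cond t = true ↔ idxf t = j) →
      table.findSome? (fun kt => kt.2.findSome? (fun tag => if cond tag then some kt.1 else none))
        = ((table.flatMap (fun kt =>
            (kt.2.filter (fun t => decide (idxf t ≠ -1))).map (fun t => (idxf t, kt.1)))).find?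
              (fun x => decide (x.1 = j))).map (·.2) := by
  intro table
  induction table with
  | nil => intro _; rfl
  | cons kt rest ih =>
      intro H
      rw [List.findSome?_cons, List.flatMap_cons, List.find?_append,
        pvInner_tags cond idxf j hj kt.1 kt.2 (H kt (List.mem_cons_self ..))]
      cases hA1 : ((kt.2.filter (fun t => decide (idxf t ≠ -1))).map (fun t => (idxf t, kt.1))).find?
          (fun x => decide (x.1 = j)) with
      | some v => simp
      | none =>
          simp only [Option.map_none, Option.none_or]
          exact ih (fun kt' hkt' => H kt' (List.mem_cons_of_mem _ hkt'))

-- B, with the range and the slice/startswith test put into List form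
lemma pvB_eq (caller_name : String) :
    grab_caller_language_alt caller_name
      = (List.range (("-" ++ caller_name ++ "-").toList.length)).findSome? (fun i =>
          pvCallerLanguages.findSome? (fun kt =>
            kt.2.findSome? (fun tag =>
              if PySem.Str.startswith
                  (PySem.Str.slice ("-" ++ caller_name ++ "-") (some (i : Int)) none)
                  ("-" ++ tag ++ "-")
              then some kt.1 else none))) := by
  rw [show grab_caller_language_alt caller_name
      = (PySem.List.pyRange 0 (PySem.Str.len ("-" ++ caller_name ++ "-")) 1).findSome? (fun i =>
          pvCallerLanguages.findSome? (fun kt =>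
            kt.2.findSome? (fun tag =>
              if PySem.Str.startswith
                  (PySem.Str.slice ("-" ++ caller_name ++ "-") (some i) none)
                  ("-" ++ tag ++ "-")
              then some kt.1 else none))) from rfl]
  rw [PySem.Str.len_eq, PySem.List.pyRange_zero_natCast, List.findSome?_map]
  rfl

-- ===== VERDICT (by name: the statement is the Claim_ definition above) =====
theorem grab_caller_language_spec : Claim_equal_grab_caller_language := by
  intro cn _
  unfold Spec_grab_caller_language
  rw [pvA_eq cn, pvB_eq cn]
  set idxS : String → Int := fun t => PySem.Str.find ("-" ++ cn ++ "-") ("-" ++ t ++ "-") with hidx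
  have hidxC : ∀ t : String, idxS t
      = PySem.Chars.find ("-" ++ cn ++ "-").toList ("-" ++ t ++ "-").toList := by
    intro t; simp [hidx]
  cases hfold : (pvOccs idxS).foldl pvStep none with
  | none =>
      have hnil := pvFoldl_none_eq_nil _ hfold
      simp only [Option.map_none]
      symm
      apply List.findSome?_eq_none_iff.mpr
      intro i _
      apply List.findSome?_eq_none_iff.mpr
      intro kt hkt
      apply List.findSome?_eq_none_iff.mpr
      intro tag htag
      cases hc : PySem.Str.startswith
          (PySem.Str.slice ("-" ++ cn ++ "-") (some (i : Int)) none) ("-" ++ tag ++ "-") with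
      | false => simp
      | true =>
          exfalso
          have hpre := (pvCond_iff ("-" ++ cn ++ "-") ("-" ++ tag ++ "-") i).mp hc
          have h0 := pvIdx_nonneg hpre
          have hne : idxS tag ≠ -1 := by rw [hidxC]; omega
          have hmem := pvMem_occs_intro idxS hkt htag hne
          rw [hnil] at hmem
          simp at hmem
  | some m =>
      obtain ⟨l1, l2, hdec, hl1, hall⟩ := pvMin_decomp _ _ hfold
      have hmem : m ∈ pvOccs idxS := by
        rw [hdec]; exact List.mem_append_right _ (List.mem_cons_self ..)
      obtain ⟨kt0, hkt0, t0, ht0, hne0, hmx⟩ := pvMem_occs_elim idxS hmem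
      have hm1 : m.1 = idxS t0 := by rw [hmx]
      have h0 : 0 ≤ m.1 := by
        have hge := PySem.Chars.neg_one_le_find ("-" ++ cn ++ "-").toList ("-" ++ t0 ++ "-").toList
        rw [hm1, hidxC] at *
        omega
      have hjm : ((m.1.toNat : Nat) : Int) = m.1 := Int.toNat_of_nonneg h0
      have hprefj : ("-" ++ t0 ++ "-").toList <+: ("-" ++ cn ++ "-").toList.drop m.1.toNat := by
        have h0' : 0 ≤ PySem.Chars.find ("-" ++ cn ++ "-").toList ("-" ++ t0 ++ "-").toList := by
          rw [← hidxC, ← hm1]; exact h0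
        have := (PySem.Chars.find_spec h0').1
        rwa [show (PySem.Chars.find ("-" ++ cn ++ "-").toList ("-" ++ t0 ++ "-").toList).toNat
            = m.1.toNat from by rw [← hidxC, ← hm1]] at this
      have hjlen : m.1.toNat < ("-" ++ cn ++ "-").toList.length := by
        by_contra hle
        rw [not_lt] at hle
        rw [List.drop_eq_nil_of_le hle] at hprefj
        have := List.prefix_nil.mp hprefj
        simp at this
      simp only [Option.map_some]
      symm
      apply pvFindSome_range _ _ m.1.toNat m.2 hjlen
      · -- below the minimum no tag matches
        intro i hij
        apply List.findSome?_eq_none_iff.mpr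
        intro kt hkt
        apply List.findSome?_eq_none_iff.mpr
        intro tag htag
        cases hc : PySem.Str.startswith
            (PySem.Str.slice ("-" ++ cn ++ "-") (some (i : Int)) none) ("-" ++ tag ++ "-") with
        | false => simp
        | true =>
            exfalso
            have hpre := (pvCond_iff ("-" ++ cn ++ "-") ("-" ++ tag ++ "-") i).mp hc
            have h0' := pvIdx_nonneg hpre
            have hle' := pvIdx_le hpre
            have hne : idxS tag ≠ -1 := by rw [hidxC]; omega
            have hmem' := pvMem_occs_intro idxS hkt htag hne
            have hge := hall _ hmem'
            rw [hidxC tag] at hge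
            omega
      · -- at the minimum the table scan returns m's key
        have H : ∀ kt ∈ pvCallerLanguages, ∀ t ∈ kt.2,
            (PySem.Str.startswith
              (PySem.Str.slice ("-" ++ cn ++ "-") (some (m.1.toNat : Int)) none)
              ("-" ++ t ++ "-") = true) ↔ idxS t = m.1 := by
          intro kt hkt t ht
          constructor
          · intro hc
            have hpre := (pvCond_iff ("-" ++ cn ++ "-") ("-" ++ t ++ "-") m.1.toNat).mp hc
            have h0' := pvIdx_nonneg hpre
            have hle' := pvIdx_le hpre
            have hne : idxS t ≠ -1 := by rw [hidxC]; omega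
            have hge := hall _ (pvMem_occs_intro idxS hkt ht hne)
            rw [hidxC t] at *
            omega
          · intro he
            apply (pvCond_iff ("-" ++ cn ++ "-") ("-" ++ t ++ "-") m.1.toNat).mpr
            have h0' : 0 ≤ PySem.Chars.find ("-" ++ cn ++ "-").toList ("-" ++ t ++ "-").toList := by
              rw [← hidxC, he]; exact h0
            have := (PySem.Chars.find_spec h0').1
            rwa [show (PySem.Chars.find ("-" ++ cn ++ "-").toList ("-" ++ t ++ "-").toList).toNat
                = m.1.toNat from by rw [← hidxC, he]] at this
        have hinner := pvInner_eq
          (fun t => PySem.Str.startswith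
            (PySem.Str.slice ("-" ++ cn ++ "-") (some (m.1.toNat : Int)) none) ("-" ++ t ++ "-"))
          idxS m.1 (by omega) pvCallerLanguages H
        rw [show (pvCallerLanguages.flatMap (fun kt =>
            (kt.2.filter (fun t => decide (idxS t ≠ -1))).map (fun t => (idxS t, kt.1))))
            = pvOccs idxS from rfl] at hinner
        rw [hinner, hdec, List.find?_append]
        have hno : l1.find? (fun x => decide (x.1 = m.1)) = none := by
          apply List.find?_eq_none.mpr
          intro x hx
          have := hl1 x hx
          simp only [decide_eq_true_eq]
          omega
        rw [hno, Option.none_or, List.find?_cons_of_pos (by simp)]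
        rfl
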